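-- pv_equiv track=rewrite | github.com/phenkka/t1 | runner.py | t_mixed
-- ===== SOURCE A (Python) =====
-- def t_mixed(s):
--     out, up = [], True
--     for ch in s:
--         if ch.isalpha():
--             out.append(ch.upper() if up else ch.lower()); up = not up
--         else:
--             out.append(ch)
--     return "".join(out)
-- ===== SOURCE B (Python) =====
-- def t_mixed(s):
--     letters = [ch for ch in s if ch.isalpha()]
--     transformed = [c.upper() if i % 2 == 0 else c.lower() for i, c in enumerate(letters)]
--     it = iter(transformed)
--     return "".join(next(it) if ch.isalpha() else ch for ch in s)
-- ===== Notes on version B (the rewrite author's own statement) =====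
-- stated objective: alternative
-- what changed: Replaces the single stateful boolean-toggle pass with an extract-transform-merge: filter out the letters, case them by index parity via enumerate, then merge them back into the original string at the alphabetic positions.
import Mathlib
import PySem

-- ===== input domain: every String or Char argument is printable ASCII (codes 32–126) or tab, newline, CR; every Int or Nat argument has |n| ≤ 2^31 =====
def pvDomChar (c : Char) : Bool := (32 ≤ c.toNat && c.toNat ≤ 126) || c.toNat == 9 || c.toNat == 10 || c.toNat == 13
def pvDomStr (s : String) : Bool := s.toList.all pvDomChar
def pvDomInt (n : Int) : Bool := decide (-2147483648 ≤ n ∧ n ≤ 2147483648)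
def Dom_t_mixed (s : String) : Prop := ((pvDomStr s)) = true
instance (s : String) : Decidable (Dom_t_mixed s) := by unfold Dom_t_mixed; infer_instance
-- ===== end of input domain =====

-- B replaces A's stateful boolean-toggle pass by extract (filter letters), transform (case by index parity), merge back; same O(n) cost, return value only.

-- ===== PORT A =====
-- the for-loop of A: state is the toggle `up`, output built a char at a time
def tMixedGoA : List Char → Bool → List Char
  | [], _ => []
  | c :: cs, up =>
    if PySem.Chars.isalpha c then
      (if up then PySem.Chars.upperChar c else PySem.Chars.lowerChar c) :: tMixedGoA cs (!up)
    else
      c :: tMixedGoA cs up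

def t_mixed (s : String) : String := String.ofList (tMixedGoA s.toList true)

-- ===== PORT B =====
-- transform: i-th extracted letter upper if i even else lower
def tMixedTransform (letters : List Char) : List Char :=
  (PySem.List.enumerate letters 0).map
    (fun p => if p.1 % 2 == 0 then PySem.Chars.upperChar p.2 else PySem.Chars.lowerChar p.2)

-- merge: second pass over s, consuming the transformed-letter iterator at alphabetic positions
def tMixedMerge : List Char → List Char → List Char
  | [], _ => []
  | c :: cs, it =>
    if PySem.Chars.isalpha c then
      match it with
      | t :: ts => t :: tMixedMerge cs ts
      | [] => tMixedMerge cs []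
    else
      c :: tMixedMerge cs it

def t_mixed_alt (s : String) : String :=
  String.ofList (tMixedMerge s.toList (tMixedTransform (s.toList.filter PySem.Chars.isalpha)))

-- ===== PRECONDITION & SPEC =====
def Spec_t_mixed (s : String) (out : String) : Prop := out = t_mixed_alt s
instance (s : String) (out : String) : Decidable (Spec_t_mixed s out) := by unfold Spec_t_mixed; infer_instance

-- ===== CLAIM (what is proved, stated in full; the proofs are below) =====
def Claim_equal_t_mixed : Prop := ∀ (s : String), Dom_t_mixed s → Spec_t_mixed s (t_mixed s)

-- ===== LEMMAS AND PROOFS =====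

theorem tMixed_go_eq_merge (cs : List Char) (k : Int) :
    tMixedGoA cs (k % 2 == 0) =
      tMixedMerge cs ((PySem.List.enumerate (cs.filter PySem.Chars.isalpha) k).map
        (fun p => if p.1 % 2 == 0 then PySem.Chars.upperChar p.2 else PySem.Chars.lowerChar p.2)) := by
  induction cs generalizing k with
  | nil => simp [tMixedGoA, tMixedMerge]
  | cons c cs ih =>
    by_cases h : PySem.Chars.isalpha c = true
    · have hpar : (!(k % 2 == 0)) = ((k + 1) % 2 == 0) := by
        rcases Int.emod_two_eq k with h2 | h2 <;> simp [h2] <;> omega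
    -- unfold one step of both programs by hand so that simp never touches the map lambda
      have hf : (c :: cs).filter PySem.Chars.isalpha = c :: cs.filter PySem.Chars.isalpha := by
        simp [h]
      rw [hf, PySem.List.enumerate_cons, List.map_cons]
      simp only [tMixedGoA, tMixedMerge, h, if_true]
      rw [hpar, ih (k + 1)]
    · have h' : PySem.Chars.isalpha c = false := by
        exact Bool.not_eq_true _ ▸ by simpa using h
      have hf : (c :: cs).filter PySem.Chars.isalpha = cs.filter PySem.Chars.isalpha := by
        simp [h']
      rw [hf]
      simp only [tMixedGoA, tMixedMerge, h', Bool.false_eq_true, if_false]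
      rw [ih k]

-- ===== VERDICT (by name: the statement is the Claim_ definition above) =====
theorem t_mixed_spec : Claim_equal_t_mixed := by
  intro s _
  unfold Spec_t_mixed t_mixed t_mixed_alt tMixedTransform
  exact congrArg String.ofList (tMixed_go_eq_merge s.toList 0)
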